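-- pv_equiv track=rewrite | github.com/AbuJohnk12/DigiMark | DigiMark.py | set_one_hot
-- ===== SOURCE A (Python) =====
-- def _norm(s: str) -> str:
--     return str(s or "").lower().strip().replace(" ", "").replace("-", "").replace("_", "")
--
-- def set_one_hot(prefix: str, selected: str, all_opts: list[str], row: dict) -> str:
--     """Set row[f'{prefix}{mapped}']=1 and return the mapped option."""
--     if not all_opts:
--         return None
--     sv = _norm(selected)
--
--     # exact
--     for opt in all_opts:
--         if _norm(opt) == sv:
--             col = f"{prefix}{opt}"
--             if col in row: row[col] = 1
--             return opt
--     # partial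
--     for opt in all_opts:
--         no = _norm(opt)
--         if no in sv or sv in no:
--             col = f"{prefix}{opt}"
--             if col in row: row[col] = 1
--             return opt
--     # fallback
--     fallback = all_opts[0]
--     col = f"{prefix}{fallback}"
--     if col in row: row[col] = 1
--     return fallback
-- ===== SOURCE B (Python) =====
-- def _norm(s: str) -> str:
--     return str(s or "").lower().strip().replace(" ", "").replace("-", "").replace("_", "")
--
-- def set_one_hot(prefix: str, selected: str, all_opts: list[str], row: dict) -> str:
--     """Single fused scan: exact match returns immediately; first partial is
--     remembered as a candidate; one shared column-setting return point."""
--     if not all_opts: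
--         return None
--     sv = _norm(selected)
--     first_partial = None
--     chosen = None
--     for opt in all_opts:
--         no = _norm(opt)
--         if no == sv:
--             chosen = opt
--             break
--         if first_partial is None and (no in sv or sv in no):
--             first_partial = opt
--     if chosen is None:
--         chosen = first_partial if first_partial is not None else all_opts[0]
--     col = f"{prefix}{chosen}"
--     if col in row:
--         row[col] = 1
--     return chosen
-- ===== Notes on version B (the rewrite author's own statement) =====
-- stated objective: alternative
-- what changed: Replaces A's two sequential scans (exact pass, then partial pass) plus triplicated column-setting code with one fused scan that records the first partial candidate while still hunting for an exact match, and a single shared column-setting return point.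
import Mathlib
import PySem

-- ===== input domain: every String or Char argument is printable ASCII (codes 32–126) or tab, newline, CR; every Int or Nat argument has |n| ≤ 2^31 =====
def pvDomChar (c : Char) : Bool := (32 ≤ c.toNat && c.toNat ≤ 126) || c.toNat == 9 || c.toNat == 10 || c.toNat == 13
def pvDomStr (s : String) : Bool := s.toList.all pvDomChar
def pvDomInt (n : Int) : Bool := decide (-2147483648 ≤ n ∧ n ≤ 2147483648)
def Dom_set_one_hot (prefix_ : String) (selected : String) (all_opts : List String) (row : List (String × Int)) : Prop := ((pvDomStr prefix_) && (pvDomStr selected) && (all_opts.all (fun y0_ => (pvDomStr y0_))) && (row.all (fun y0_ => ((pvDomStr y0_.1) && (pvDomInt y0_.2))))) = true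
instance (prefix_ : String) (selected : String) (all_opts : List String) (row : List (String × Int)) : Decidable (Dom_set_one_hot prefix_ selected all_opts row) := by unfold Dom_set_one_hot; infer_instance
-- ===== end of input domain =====

-- B fuses A's two scans into one (recording the first partial candidate while still
-- looking for an exact match) with a single shared return point; objective: alternative.
-- A also mutates `row` in place (row[col] = 1); only the RETURN value is proved equal here.

-- ===== PORT A =====
-- _norm(s) = str(s or "").lower().strip().replace(" ","").replace("-","").replace("_","")
def pvNorm (s : String) : String :=
  let s0 := if s == "" then "" else s      -- `s or ""`
  PySem.Str.replace (PySem.Str.replace (PySem.Str.replace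
    (PySem.Str.strip (PySem.Str.lower s0)) " " "") "-" "") "_" ""

-- `no in sv or sv in no`
def pvPartialHit (sv no : String) : Bool :=
  PySem.Str.isIn no sv || PySem.Str.isIn sv no

-- first `for` loop of A (exact pass)
def pvExactLoop (sv : String) : List String → Option String
  | [] => none
  | opt :: rest => if pvNorm opt == sv then some opt else pvExactLoop sv rest

-- second `for` loop of A (partial pass)
def pvPartialLoop (sv : String) : List String → Option String
  | [] => none
  | opt :: rest =>
      let no := pvNorm opt
      if pvPartialHit sv no then some opt else pvPartialLoop sv rest

def set_one_hot (prefix_ : String) (selected : String) (all_opts : List String) (row : List (String × Int)) : Option String :=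
  match all_opts with
  | [] => none
  | fallback :: _ =>
      let sv := pvNorm selected
      match pvExactLoop sv all_opts with
      | some opt => some opt
      | none =>
          match pvPartialLoop sv all_opts with
          | some opt => some opt
          | none => some fallback          -- fallback = all_opts[0]

-- ===== PORT B =====
-- B's single fused loop: return on exact; remember the first partial in `first_partial`.
def pvFusedLoop (sv : String) (firstPartial : Option String) : List String → Option String
  | [] => firstPartial
  | opt :: rest =>
      let no := pvNorm opt
      if no == sv then some opt
      else
        let fp := if firstPartial.isNone && pvPartialHit sv no then some opt else firstPartial
        pvFusedLoop sv fp rest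

def set_one_hot_alt (prefix_ : String) (selected : String) (all_opts : List String) (row : List (String × Int)) : Option String :=
  match all_opts with
  | [] => none
  | first :: _ =>
      let sv := pvNorm selected
      match pvFusedLoop sv none all_opts with
      | some chosen => some chosen
      | none => some first

-- ===== PRECONDITION & SPEC =====
def Spec_set_one_hot (prefix_ : String) (selected : String) (all_opts : List String) (row : List (String × Int)) (out : Option String) : Prop := out = set_one_hot_alt prefix_ selected all_opts row
instance (prefix_ : String) (selected : String) (all_opts : List String) (row : List (String × Int)) (out : Option String) : Decidable (Spec_set_one_hot prefix_ selected all_opts row out) := by unfold Spec_set_one_hot; infer_instance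

-- ===== CLAIM (what is proved, stated in full; the proofs are below) =====
def Claim_equal_set_one_hot : Prop := ∀ (prefix_ : String) (selected : String) (all_opts : List String) (row : List (String × Int)), Dom_set_one_hot prefix_ selected all_opts row → Spec_set_one_hot prefix_ selected all_opts row (set_one_hot prefix_ selected all_opts row)

-- ===== LEMMAS AND PROOFS =====
-- The fused loop equals: exact result if any, else the already-recorded partial, else
-- the first partial of the remaining list.
theorem pvFusedLoop_eq (sv : String) (fp : Option String) (l : List String) :
    pvFusedLoop sv fp l =
      match pvExactLoop sv l with
      | some o => some o
      | none => match fp with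
                | some p => some p
                | none => pvPartialLoop sv l := by
  induction l generalizing fp with
  | nil => cases fp <;> simp [pvFusedLoop, pvExactLoop, pvPartialLoop]
  | cons opt rest ih =>
      simp only [pvFusedLoop, pvExactLoop, pvPartialLoop]
      by_cases hx : pvNorm opt == sv
      · simp [hx]
      · simp only [hx]
        rw [ih]
        cases fp with
        | some p => simp
        | none =>
            by_cases hp : pvPartialHit sv (pvNorm opt) <;> simp [hp]

-- ===== VERDICT (by name: the statement is the Claim_ definition above) =====
theorem set_one_hot_spec : Claim_equal_set_one_hot := by
  intro prefix_ selected all_opts row _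
  unfold Spec_set_one_hot set_one_hot set_one_hot_alt
  cases all_opts with
  | nil => rfl
  | cons first rest =>
      simp only []
      rw [pvFusedLoop_eq]
      cases hE : pvExactLoop (pvNorm selected) (first :: rest) with
      | some o => simp
      | none =>
          cases hP : pvPartialLoop (pvNorm selected) (first :: rest) <;> simp
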